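-- pv_equiv track=rewrite | github.com/BeeNeal/data_structures | is_monotonic.py | is_monotonic_decreasing
-- ===== SOURCE A (Python) =====
-- def is_monotonic_decreasing(A):
--     i = 0
--     j = 1
--     while j < len(A):
--         # for ind, val in enumerate(A):
--         if A[i] >= A[j]:
--             i += 1
--             j += 1
--             continue
--         else:
--             return False
--     return True
-- ===== SOURCE B (Python) =====
-- def is_monotonic_decreasing(A):
--     return A == sorted(A, reverse=True)
-- ===== Notes on version B (the rewrite author's own statement) =====
-- stated objective: idiomatic
-- what changed: Replaces the explicit two-index while loop over consecutive pairs with a sort-then-compare: the list is monotonically decreasing iff it equals its descending-sorted copy.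
import Mathlib
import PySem

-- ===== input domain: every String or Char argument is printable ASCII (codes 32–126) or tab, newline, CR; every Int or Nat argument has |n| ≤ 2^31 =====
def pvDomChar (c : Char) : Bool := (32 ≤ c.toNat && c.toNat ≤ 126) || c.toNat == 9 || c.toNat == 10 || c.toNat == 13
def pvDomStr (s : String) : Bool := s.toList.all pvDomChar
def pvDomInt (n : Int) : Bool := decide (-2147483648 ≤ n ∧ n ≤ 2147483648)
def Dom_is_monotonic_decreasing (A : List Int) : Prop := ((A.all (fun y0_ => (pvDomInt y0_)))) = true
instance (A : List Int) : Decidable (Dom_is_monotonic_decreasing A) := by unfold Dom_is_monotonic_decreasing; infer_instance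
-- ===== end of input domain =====

-- B replaces the pairwise while-loop scan by an idiomatic sort-then-compare: A == sorted(A, reverse=True).


-- ===== PORT A =====
-- the while loop over indices i, j (= i+1): recursion on j, comparing A[i] >= A[j]
def is_monotonic_decreasing_loop (A : List Int) (i j : Nat) : Bool :=
  if _h : j < A.length then
    if PySem.List.pyGetD A (i : Int) 0 ≥ PySem.List.pyGetD A (j : Int) 0 then
      is_monotonic_decreasing_loop A (i + 1) (j + 1)
    else false
  else true
termination_by A.length - j

def is_monotonic_decreasing (A : List Int) : Bool :=
  is_monotonic_decreasing_loop A 0 1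

-- ===== PORT B =====
def is_monotonic_decreasing_alt (A : List Int) : Bool :=
  A == PySem.List.sorted A (fun x => x) true

-- ===== PRECONDITION & SPEC =====
def Spec_is_monotonic_decreasing (A : List Int) (out : Bool) : Prop := out = is_monotonic_decreasing_alt A
instance (A : List Int) (out : Bool) : Decidable (Spec_is_monotonic_decreasing A out) := by unfold Spec_is_monotonic_decreasing; infer_instance

-- ===== CLAIM (what is proved, stated in full; the proofs are below) =====
def Claim_equal_is_monotonic_decreasing : Prop := ∀ (A : List Int), Dom_is_monotonic_decreasing A → Spec_is_monotonic_decreasing A (is_monotonic_decreasing A)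

-- ===== LEMMAS AND PROOFS =====

-- the loop with j = i+1 decides the chain condition on the suffix starting at i
lemma loop_eq_chain' (A : List Int) (i : Nat) :
    is_monotonic_decreasing_loop A i (i + 1) = decide (List.IsChain (· ≥ ·) (A.drop i)) := by
  by_cases h : i + 1 < A.length
  · have hi : i < A.length := by omega
    rw [is_monotonic_decreasing_loop]
    have hdrop : A.drop i = A[i] :: A.drop (i + 1) := List.drop_eq_getElem_cons hi
    have hdrop' : A.drop (i + 1) = A[i + 1] :: A.drop (i + 2) := List.drop_eq_getElem_cons h
    have hg1 : PySem.List.pyGetD A (i : Int) 0 = A[i] := by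
      simp [PySem.List.pyGetD_natCast, hi]
    have hg2 : PySem.List.pyGetD A ((i + 1 : Nat) : Int) 0 = A[i + 1] := by
      rw [PySem.List.pyGetD_natCast]; exact List.getD_eq_getElem A 0 h
    rw [hdrop, hdrop']
    by_cases hcmp : A[i] ≥ A[i + 1]
    · have := loop_eq_chain' A (i + 1)
      rw [hdrop'] at this
      simp only [h, dif_pos]
      rw [hg1, hg2, if_pos hcmp, this]
      simp only [decide_eq_decide, List.isChain_cons_cons]
      exact (and_iff_right hcmp).symm
    · simp only [h, dif_pos]
      rw [hg1, hg2, if_neg hcmp]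
      simp only [false_eq_decide_iff, List.isChain_cons_cons]
      exact fun hc => hcmp hc.1
  · rw [is_monotonic_decreasing_loop]
    simp only [h, dif_neg, not_false_iff]
    rcases Nat.lt_or_ge i A.length with hi | hi
    · have : A.drop i = [A[i]] := by
        have := List.drop_eq_getElem_cons hi
        rw [this, List.drop_eq_nil_of_le (by omega)]
      simp [this]
    · simp [List.drop_eq_nil_of_le hi]
termination_by A.length - i
decreasing_by omega

lemma isChain_iff_eq_sorted (A : List Int) :
    List.IsChain (· ≥ ·) A ↔ A = PySem.List.sorted A (fun x => x) true := by
  rw [List.isChain_iff_pairwise]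
  constructor
  · intro hp
    exact Eq.symm (PySem.List.sorted_rev_eq_self_of_pairwise A (fun x => x)
      (by simpa using hp))
  · intro heq
    have := PySem.List.sorted_pairwise_rev (xs := A) (key := fun x : Int => x)
    rw [← heq] at this
    simpa using this

-- ===== VERDICT (by name: the statement is the Claim_ definition above) =====
theorem is_monotonic_decreasing_spec : Claim_equal_is_monotonic_decreasing := by
  intro A _
  unfold Spec_is_monotonic_decreasing is_monotonic_decreasing is_monotonic_decreasing_alt
  have h := loop_eq_chain' A 0
  rw [List.drop_zero] at h
  rw [h]
  by_cases heq : A = PySem.List.sorted A (fun x => x) true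
  · rw [decide_eq_true ((isChain_iff_eq_sorted A).mpr heq)]
    exact (beq_iff_eq.mpr heq).symm
  · rw [decide_eq_false (fun hc => heq ((isChain_iff_eq_sorted A).mp hc))]
    exact (beq_eq_false_iff_ne.mpr heq).symm
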